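-- pv_equiv track=rewrite | github.com/eug-gavrilov/AlgorithmsStudy | closest_to_zero.py | answer
-- ===== SOURCE A (Python) =====
-- def answer(numbers):
--
--     closest = numbers[0]
--     closest_len = abs(numbers[0])
--
--     for i in range(len(numbers)):
--
--         current = numbers[i]
--
--         if abs(current) < closest_len or (abs(current) == closest_len and current > closest):
--             closest = current
--             closest_len = abs(current)
--
--     return closest
-- ===== SOURCE B (Python) =====
-- def answer(numbers):
--     return sorted(numbers, key=lambda x: (abs(x), -x))[0]
-- ===== Notes on version B (the rewrite author's own statement) =====
-- stated objective: idiomatic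
-- what changed: Replaces the running keep-the-best loop with sort-then-select: a full stable sort keyed by (abs(x), -x) so the first element is the one closest to zero with ties going to the larger value.
import Mathlib
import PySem

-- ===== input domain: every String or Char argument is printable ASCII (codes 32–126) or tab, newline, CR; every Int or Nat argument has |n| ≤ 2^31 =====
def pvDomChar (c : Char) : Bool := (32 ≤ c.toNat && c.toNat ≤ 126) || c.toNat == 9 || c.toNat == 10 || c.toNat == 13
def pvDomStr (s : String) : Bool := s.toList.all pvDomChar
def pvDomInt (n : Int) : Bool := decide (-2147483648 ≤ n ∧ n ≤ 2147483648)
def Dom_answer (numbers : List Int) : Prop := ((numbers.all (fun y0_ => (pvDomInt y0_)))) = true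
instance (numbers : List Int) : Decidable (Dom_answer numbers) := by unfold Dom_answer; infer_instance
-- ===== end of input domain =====

-- B replaces A's running keep-the-best loop with the idiomatic sort-then-select:
-- sorted(numbers, key=lambda x: (abs(x), -x))[0]; no speed claim is made (A is a single pass, B sorts).


-- ===== PORT A =====
-- closest = numbers[0]; closest_len = abs(numbers[0]); for i in range(len(numbers)): update; return closest
-- state st = (closest, closest_len); 'current > closest' is 'st.1 < current'
def answer (numbers : List Int) : Int :=
  ((PySem.List.pyRange 0 (numbers.length : Int) 1).foldl
    (fun (st : Int × Int) i =>
      if |PySem.List.pyGetD numbers i 0| < st.2 ∨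
          (|PySem.List.pyGetD numbers i 0| = st.2 ∧ st.1 < PySem.List.pyGetD numbers i 0) then
        (PySem.List.pyGetD numbers i 0, |PySem.List.pyGetD numbers i 0|)
      else st)
    (PySem.List.pyGetD numbers 0 0, |PySem.List.pyGetD numbers 0 0|)).1

-- ===== PORT B =====
-- return sorted(numbers, key=lambda x: (abs(x), -x))[0]
def answer_alt (numbers : List Int) : Int :=
  (PySem.List.pyGet? (PySem.List.sorted2 numbers (fun x => |x|) (fun x => -x) false) 0).getD 0

-- ===== PRECONDITION & SPEC =====
-- Python A raises IndexError on the empty list (numbers[0]); so does B.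
def Pre_answer (numbers : List Int) : Prop := numbers ≠ []
instance (numbers : List Int) : Decidable (Pre_answer numbers) := by unfold Pre_answer; infer_instance
def pvWitness_answer : List Int := ([3, -3, 1] : List Int)

def Spec_answer (numbers : List Int) (out : Int) : Prop := out = answer_alt numbers
instance (numbers : List Int) (out : Int) : Decidable (Spec_answer numbers out) := by unfold Spec_answer; infer_instance

-- ===== CLAIM (what is proved, stated in full; the proofs are below) =====
def Claim_equal_answer : Prop := ∀ (numbers : List Int), Dom_answer numbers → Pre_answer numbers → Spec_answer numbers (answer numbers)

-- ===== LEMMAS AND PROOFS =====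

-- the strict order "a is strictly closer to zero than b, ties broken towards the larger value"
def ltk (a b : Int) : Prop := |a| < |b| ∨ (|a| = |b| ∧ b < a)

lemma ltk_irrefl (a : Int) : ¬ ltk a a := by unfold ltk; omega

lemma ltk_trans {a b c : Int} (h1 : ltk a b) (h2 : ltk b c) : ltk a c := by
  unfold ltk at *; omega

lemma ltk_connex {a b : Int} (h : a ≠ b) : ltk a b ∨ ltk b a := by
  unfold ltk; omega

-- sorted2's Bool comparator agrees with ltk
lemma ltb_iff (a b : Int) :
    (decide (|a| < |b|) || (!decide (|b| < |a|) && decide (-a < -b))) = true ↔ ltk a b := by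
  unfold ltk
  simp only [Bool.or_eq_true, Bool.and_eq_true, Bool.not_eq_true', decide_eq_true_eq,
    decide_eq_false_iff_not]
  omega

-- insertBy with the lex comparator preserves "no later element is ltk-below an earlier one"
lemma insertBy_pairwise (x : Int) (ys : List Int)
    (h : ys.Pairwise (fun a b => ¬ ltk b a)) :
    (PySem.List.insertBy
      (fun a b => decide (|a| < |b|) || (!decide (|b| < |a|) && decide (-a < -b))) x ys).Pairwise
      (fun a b => ¬ ltk b a) := by
  induction ys with
  | nil => exact List.pairwise_singleton _ _
  | cons y ys ih =>
    rw [List.pairwise_cons] at h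
    obtain ⟨hy, hys⟩ := h
    rw [show PySem.List.insertBy
        (fun a b => decide (|a| < |b|) || (!decide (|b| < |a|) && decide (-a < -b))) x (y :: ys)
        = if (decide (|x| < |y|) || (!decide (|y| < |x|) && decide (-x < -y))) then x :: y :: ys
          else y :: PySem.List.insertBy
            (fun a b => decide (|a| < |b|) || (!decide (|b| < |a|) && decide (-a < -b))) x ys
        from rfl]
    by_cases hlt : (decide (|x| < |y|) || (!decide (|y| < |x|) && decide (-x < -y))) = true
    · rw [if_pos hlt]
      have hxy : ltk x y := (ltb_iff x y).1 hlt
      refine List.pairwise_cons.2 ⟨?_, List.pairwise_cons.2 ⟨hy, hys⟩⟩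
      intro z hz
      rcases List.mem_cons.1 hz with rfl | hz
      · exact fun h' => ltk_irrefl _ (ltk_trans h' hxy)
      · exact fun h' => hy z hz (ltk_trans h' hxy)
    · rw [if_neg hlt]
      refine List.pairwise_cons.2 ⟨?_, ih hys⟩
      intro z hz
      rcases (PySem.List.mem_insertBy _ x z ys).1 hz with rfl | hz
      · exact fun h' => hlt ((ltb_iff z y).2 h')
      · exact hy z hz

lemma sorted2_pairwise_ltk (xs : List Int) :
    (PySem.List.sorted2 xs (fun x => |x|) (fun x => -x) false).Pairwise (fun a b => ¬ ltk b a) := by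
  show (xs.foldl (fun acc x => PySem.List.insertBy _ x acc) []).Pairwise _
  suffices h : ∀ (acc : List Int), acc.Pairwise (fun a b => ¬ ltk b a) →
      (xs.foldl (fun acc x => PySem.List.insertBy
        (fun a b => decide (|a| < |b|) || (!decide (|b| < |a|) && decide (-a < -b))) x acc)
        acc).Pairwise (fun a b => ¬ ltk b a) from
    h [] (by simp)
  induction xs with
  | nil => intro acc h; simpa using h
  | cons x xs ih =>
    intro acc h
    exact ih _ (insertBy_pairwise x acc h)

-- B's result is a member of numbers and ltk-minimal
lemma alt_min (numbers : List Int) (h : numbers ≠ []) :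
    answer_alt numbers ∈ numbers ∧ ∀ y ∈ numbers, ¬ ltk y (answer_alt numbers) := by
  have hperm := PySem.List.sorted2_perm numbers (fun x => |x|) (fun x => -x) false
  cases hs : PySem.List.sorted2 numbers (fun x => |x|) (fun x => -x) false with
  | nil =>
    rw [hs] at hperm
    exact absurd (List.Perm.eq_nil hperm.symm) h
  | cons m t =>
    have hmem : ∀ z, z ∈ numbers ↔ z ∈ m :: t := by
      intro z; rw [← hs]; exact (hperm.mem_iff).symm
    have halt : answer_alt numbers = m := by
      simp [answer_alt, hs, PySem.List.pyGet?, PySem.List.pyIdx?]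
    have hpw := sorted2_pairwise_ltk numbers
    rw [hs, List.pairwise_cons] at hpw
    rw [halt]
    refine ⟨(hmem m).2 List.mem_cons_self, ?_⟩
    intro y hy
    rcases List.mem_cons.1 ((hmem y).1 hy) with rfl | hyt
    · exact ltk_irrefl y
    · exact hpw.1 y hyt

-- A's fold keeps the ltk-minimum of c :: xs
lemma foldA_min (xs : List Int) (c : Int) :
    (xs.foldl
      (fun (st : Int × Int) current =>
        if |current| < st.2 ∨ (|current| = st.2 ∧ st.1 < current) then (current, |current|) else st)
      (c, |c|)).1 ∈ c :: xs ∧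
    ∀ y ∈ c :: xs, ¬ ltk y (xs.foldl
      (fun (st : Int × Int) current =>
        if |current| < st.2 ∨ (|current| = st.2 ∧ st.1 < current) then (current, |current|) else st)
      (c, |c|)).1 := by
  induction xs generalizing c with
  | nil =>
    refine ⟨List.mem_cons_self, ?_⟩
    intro y hy
    rcases List.mem_cons.1 hy with rfl | hy
    · exact ltk_irrefl y
    · simp at hy
  | cons x xs ih =>
    simp only [List.foldl_cons]
    by_cases hc : |x| < |c| ∨ (|x| = |c| ∧ c < x)
    · rw [if_pos hc]
      obtain ⟨hm, hmin⟩ := ih x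
      have hxc : ltk x c := hc
      refine ⟨?_, ?_⟩
      · rcases List.mem_cons.1 hm with h' | h'
        · rw [h']; exact List.mem_cons_of_mem _ List.mem_cons_self
        · exact List.mem_cons_of_mem _ (List.mem_cons_of_mem _ h')
      · intro y hy
        rcases List.mem_cons.1 hy with rfl | hy'
        · exact fun h' => hmin x List.mem_cons_self (ltk_trans hxc h')
        · exact hmin y hy'
    · rw [if_neg hc]
      obtain ⟨hm, hmin⟩ := ih c
      have hxc : ¬ ltk x c := hc
      refine ⟨?_, ?_⟩
      · rcases List.mem_cons.1 hm with h' | h'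
        · rw [h']; exact List.mem_cons_self
        · exact List.mem_cons_of_mem _ (List.mem_cons_of_mem _ h')
      · intro y hy
        rcases List.mem_cons.1 hy with rfl | hy'
        · -- y = c
          exact hmin y List.mem_cons_self
        · rcases List.mem_cons.1 hy' with rfl | hy''
          · -- y = x
            intro h'
            rcases eq_or_ne y c with rfl | hne
            · exact hmin y List.mem_cons_self h'
            · rcases ltk_connex hne with h1 | h1
              · exact hxc h1
              · exact hmin c List.mem_cons_self (ltk_trans h1 h')
          · exact hmin y (List.mem_cons_of_mem _ hy'')

-- ===== VERDICT (by name: the statement is the Claim_ definition above) =====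
theorem answer_spec : Claim_equal_answer := by
  intro numbers _ hpre
  unfold Spec_answer
  obtain ⟨n0, rest, rfl⟩ : ∃ a l, numbers = a :: l := by
    cases numbers with
    | nil => exact absurd rfl hpre
    | cons a l => exact ⟨a, l, rfl⟩
  obtain ⟨hmB, hminB⟩ := alt_min (n0 :: rest) hpre
  unfold answer
  rw [PySem.List.foldl_pyRange_zero_pyGetD' (n0 :: rest) 0
    (fun (st : Int × Int) current =>
      if |current| < st.2 ∨ (|current| = st.2 ∧ st.1 < current) then (current, |current|) else st)]
  have hc0 : PySem.List.pyGetD (n0 :: rest) 0 0 = n0 := by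
    simp [PySem.List.pyGetD, PySem.List.pyGet?, PySem.List.pyIdx?]
  rw [hc0]
  rw [List.foldl_cons, if_neg (by omega : ¬ (|n0| < |n0| ∨ (|n0| = |n0| ∧ n0 < n0)))]
  obtain ⟨hmA, hminA⟩ := foldA_min rest n0
  rcases eq_or_ne ((rest.foldl
      (fun (st : Int × Int) current =>
        if |current| < st.2 ∨ (|current| = st.2 ∧ st.1 < current) then (current, |current|) else st)
      (n0, |n0|)).1) (answer_alt (n0 :: rest)) with h | h
  · exact h
  · rcases ltk_connex h with h1 | h1
    · exact absurd h1 (hminB _ hmA)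
    · exact absurd h1 (hminA _ hmB)
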